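-- pv_equiv track=rewrite | github.com/ylmzKasap/snippets | Recursion/Hanoi.py | get_landing_area
-- ===== SOURCE A (Python) =====
-- def get_landing_area(positionList):
--     """Takes a numeric list and returns the the length of top disks
--     and the index of landing area in each rod."""
--
--     one = [positionList[i][0] for i in range(len(positionList))]
--     two = [positionList[i][1] for i in range(len(positionList))]
--     three = [positionList[i][2] for i in range(len(positionList))]
--
--     topOne, landingOne = landing_area_loop(one)
--     topTwo, landingTwo = landing_area_loop(two)
--     topThree, landingThree = landing_area_loop(three)
--
--     return topOne, topTwo, topThree, landingOne, landingTwo, landingThree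
--
-- def landing_area_loop(positionList):
--     """A loop to shorten get_landing_area function."""
--
--     landingArea = 0
--     for row in positionList:
--         if row != 0:
--             return row, landingArea - 1
--         landingArea += 1
--     return 0, landingArea - 1
-- ===== SOURCE B (Python) =====
-- def get_landing_area(positionList):
--     """Single pass over the rows: keep one optional (value, index) slot per rod
--     instead of extracting three columns and scanning each with a helper."""
--     r0 = r1 = r2 = None
--     i = 0
--     for row in positionList:
--         v0, v1, v2 = row[0], row[1], row[2]
--         if r0 is None and v0 != 0:
--             r0 = (v0, i - 1)
--         if r1 is None and v1 != 0:
--             r1 = (v1, i - 1)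
--         if r2 is None and v2 != 0:
--             r2 = (v2, i - 1)
--         i += 1
--     d = len(positionList) - 1
--     t0, l0 = r0 if r0 is not None else (0, d)
--     t1, l1 = r1 if r1 is not None else (0, d)
--     t2, l2 = r2 if r2 is not None else (0, d)
--     return t0, t1, t2, l0, l1, l2
-- ===== Notes on version B (the rewrite author's own statement) =====
-- stated objective: simpler
-- what changed: Replaces A's three column-extraction comprehensions plus a per-column helper scan by a single pass over the rows that maintains one optional (value, landing-index) slot per rod and fills defaults after the loop.
import Mathlib
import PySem

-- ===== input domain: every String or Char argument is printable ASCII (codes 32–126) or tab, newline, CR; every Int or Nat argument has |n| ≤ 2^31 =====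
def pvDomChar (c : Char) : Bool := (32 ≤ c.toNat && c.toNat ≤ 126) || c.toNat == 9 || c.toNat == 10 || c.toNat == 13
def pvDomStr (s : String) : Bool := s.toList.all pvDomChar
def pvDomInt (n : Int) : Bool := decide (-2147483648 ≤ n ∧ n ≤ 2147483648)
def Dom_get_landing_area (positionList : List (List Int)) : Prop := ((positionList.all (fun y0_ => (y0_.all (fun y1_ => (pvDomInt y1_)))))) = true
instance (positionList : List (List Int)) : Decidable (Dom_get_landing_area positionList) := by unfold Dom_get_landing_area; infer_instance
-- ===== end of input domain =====

-- B replaces A's three column extractions plus per-column helper scans by one pass over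
-- the rows maintaining an optional (value, index) slot per rod (objective: simpler).

-- ===== PORT A =====
def landing_area_loop : List Int → Int → Int × Int
  | [], landingArea => (0, landingArea - 1)
  | row :: rest, landingArea =>
      if row ≠ 0 then (row, landingArea - 1) else landing_area_loop rest (landingArea + 1)

def get_landing_area (positionList : List (List Int)) : Int × Int × Int × Int × Int × Int :=
  let one := (PySem.List.pyRange 0 (positionList.length : Int) 1).map
      (fun i => PySem.List.pyGetD (PySem.List.pyGetD positionList i []) 0 0)
  let two := (PySem.List.pyRange 0 (positionList.length : Int) 1).map
      (fun i => PySem.List.pyGetD (PySem.List.pyGetD positionList i []) 1 0)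
  let three := (PySem.List.pyRange 0 (positionList.length : Int) 1).map
      (fun i => PySem.List.pyGetD (PySem.List.pyGetD positionList i []) 2 0)
  let p1 := landing_area_loop one 0
  let p2 := landing_area_loop two 0
  let p3 := landing_area_loop three 0
  (p1.1, p2.1, p3.1, p1.2, p2.2, p3.2)

-- ===== PORT B =====
-- the body of B's for-loop (row[0], row[1], row[2] read with pyGetD; in-range under Pre_)
def alt_step (st : Option (Int × Int) × Option (Int × Int) × Option (Int × Int) × Int)
    (row : List Int) : Option (Int × Int) × Option (Int × Int) × Option (Int × Int) × Int :=
  let (r0, r1, r2, i) := st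
  let v0 := PySem.List.pyGetD row 0 0
  let v1 := PySem.List.pyGetD row 1 0
  let v2 := PySem.List.pyGetD row 2 0
  let r0 := if r0 = none ∧ v0 ≠ 0 then some (v0, i - 1) else r0
  let r1 := if r1 = none ∧ v1 ≠ 0 then some (v1, i - 1) else r1
  let r2 := if r2 = none ∧ v2 ≠ 0 then some (v2, i - 1) else r2
  (r0, r1, r2, i + 1)

def get_landing_area_alt (positionList : List (List Int)) : Int × Int × Int × Int × Int × Int :=
  let st := positionList.foldl alt_step (none, none, none, 0)
  let d : Int := (positionList.length : Int) - 1
  let p0 := st.1.getD (0, d)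
  let p1 := st.2.1.getD (0, d)
  let p2 := st.2.2.1.getD (0, d)
  (p0.1, p1.1, p2.1, p0.2, p1.2, p2.2)

-- ===== PRECONDITION & SPEC =====
-- Pre_ excludes exactly the inputs on which A raises IndexError: a row with fewer than 3 entries.
def Pre_get_landing_area (positionList : List (List Int)) : Prop :=
  ∀ row ∈ positionList, 3 ≤ row.length
instance (positionList : List (List Int)) : Decidable (Pre_get_landing_area positionList) := by
  unfold Pre_get_landing_area; infer_instance

def pvWitness_get_landing_area : List (List Int) := [[0, 0, 1], [2, 0, 3]]

def Spec_get_landing_area (positionList : List (List Int)) (out : Int × Int × Int × Int × Int × Int) : Prop := out = get_landing_area_alt positionList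
instance (positionList : List (List Int)) (out : Int × Int × Int × Int × Int × Int) : Decidable (Spec_get_landing_area positionList out) := by unfold Spec_get_landing_area; infer_instance

-- ===== CLAIM (what is proved, stated in full; the proofs are below) =====
def Claim_equal_get_landing_area : Prop := ∀ (positionList : List (List Int)), Dom_get_landing_area positionList → Pre_get_landing_area positionList → Spec_get_landing_area positionList (get_landing_area positionList)

-- ===== LEMMAS AND PROOFS =====

-- the evolution of one slot of B's fold, over the column values
def slotFold : List Int → Option (Int × Int) → Int → Option (Int × Int)
  | [], r, _ => r
  | v :: rest, r, i =>
      slotFold rest (if r = none ∧ v ≠ 0 then some (v, i - 1) else r) (i + 1)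

theorem slotFold_some (xs : List Int) (p : Int × Int) (i : Int) :
    slotFold xs (some p) i = some p := by
  induction xs generalizing i with
  | nil => rfl
  | cons v rest ih => simp [slotFold, ih]

theorem foldl_alt_step (pl : List (List Int))
    (r0 r1 r2 : Option (Int × Int)) (i : Int) :
    pl.foldl alt_step (r0, r1, r2, i) =
      (slotFold (pl.map (fun row => PySem.List.pyGetD row 0 0)) r0 i,
       slotFold (pl.map (fun row => PySem.List.pyGetD row 1 0)) r1 i,
       slotFold (pl.map (fun row => PySem.List.pyGetD row 2 0)) r2 i,
       i + pl.length) := by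
  induction pl generalizing r0 r1 r2 i with
  | nil => simp [slotFold]
  | cons row rest ih =>
      simp only [List.foldl_cons, List.map_cons, slotFold, alt_step, ih, List.length_cons]
      simp only [Prod.mk.injEq]
      refine ⟨trivial, trivial, trivial, by push_cast; ring⟩

theorem slotFold_landing (xs : List Int) (k : Int) :
    (slotFold xs none k).getD (0, k + xs.length - 1) = landing_area_loop xs k := by
  induction xs generalizing k with
  | nil => simp [slotFold, landing_area_loop]
  | cons v rest ih =>
      by_cases hv : v = 0
      · simp only [slotFold, landing_area_loop, hv]
        simpa [add_assoc, add_comm, add_left_comm] using ih (k + 1)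
      · simp [slotFold, landing_area_loop, hv, slotFold_some]

theorem column_eq (pl : List (List Int)) (j : Int) :
    (PySem.List.pyRange 0 (pl.length : Int) 1).map
        (fun i => PySem.List.pyGetD (PySem.List.pyGetD pl i []) j 0) =
      pl.map (fun row => PySem.List.pyGetD row j 0) := by
  have h := PySem.List.map_pyGetD_pyRange_zero' pl ([] : List Int)
  calc (PySem.List.pyRange 0 (pl.length : Int) 1).map
        (fun i => PySem.List.pyGetD (PySem.List.pyGetD pl i []) j 0)
      = ((PySem.List.pyRange 0 (pl.length : Int) 1).map
          (fun i => PySem.List.pyGetD pl i [])).map (fun row => PySem.List.pyGetD row j 0) := by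
        rw [List.map_map]; rfl
    _ = pl.map (fun row => PySem.List.pyGetD row j 0) := by rw [h]

-- ===== VERDICT (by name: the statement is the Claim_ definition above) =====
theorem get_landing_area_spec : Claim_equal_get_landing_area := by
  intro pl _ _
  show get_landing_area pl = get_landing_area_alt pl
  simp only [get_landing_area, get_landing_area_alt, column_eq, foldl_alt_step]
  have h0 := slotFold_landing (pl.map (fun row => PySem.List.pyGetD row 0 0)) 0
  have h1 := slotFold_landing (pl.map (fun row => PySem.List.pyGetD row 1 0)) 0
  have h2 := slotFold_landing (pl.map (fun row => PySem.List.pyGetD row 2 0)) 0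
  simp only [List.length_map, zero_add] at h0 h1 h2
  rw [← h0, ← h1, ← h2]
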